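-- pv_equiv track=rewrite | github.com/cole-k/advent-of-code-2017 | 24.py | part_two
-- ===== SOURCE A (Python) =====
-- def part_two(connecting_value, ports, depth=0):
--     valid_ports = (port for port in ports if connecting_value in port)
--
--     # (max strength, length)
--     max_strength = (depth,0)
--     for a, b in valid_ports:
--         next_value = None
--         if a == connecting_value:
--             next_value = b
--         else:
--             next_value = a
--         next_depth, next_length = part_two(next_value, ports - {(a,b)},depth + 1)
--         next_length += a + b
--         max_strength = max(max_strength, (next_depth, next_length))
--     return max_strength
-- ===== SOURCE B (Python) =====
-- def part_two(connecting_value, ports, depth=0):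
--     memo = {}
--
--     def best(cv, rem):
--         key = (cv, rem)
--         if key in memo:
--             return memo[key]
--         b = (0, 0)
--         for x, y in rem:
--             if x == cv or y == cv:
--                 nv = y if x == cv else x
--                 l, s = best(nv, rem - {(x, y)})
--                 cand = (l + 1, s + x + y)
--                 if cand > b:
--                     b = cand
--         memo[key] = b
--         return b
--
--     length, strength = best(connecting_value, frozenset(ports))
--     return (depth + length, strength)
-- ===== Notes on version B (the rewrite author's own statement) =====
-- stated objective: faster
-- what changed: B replaces A's plain exhaustive recursion (which re-solves the same (connecting value, remaining ports) state once per ordering that reaches it) by a depth-independent recursion memoized on (connecting_value, frozenset of remaining ports), adding depth once at the end.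
import Mathlib
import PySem

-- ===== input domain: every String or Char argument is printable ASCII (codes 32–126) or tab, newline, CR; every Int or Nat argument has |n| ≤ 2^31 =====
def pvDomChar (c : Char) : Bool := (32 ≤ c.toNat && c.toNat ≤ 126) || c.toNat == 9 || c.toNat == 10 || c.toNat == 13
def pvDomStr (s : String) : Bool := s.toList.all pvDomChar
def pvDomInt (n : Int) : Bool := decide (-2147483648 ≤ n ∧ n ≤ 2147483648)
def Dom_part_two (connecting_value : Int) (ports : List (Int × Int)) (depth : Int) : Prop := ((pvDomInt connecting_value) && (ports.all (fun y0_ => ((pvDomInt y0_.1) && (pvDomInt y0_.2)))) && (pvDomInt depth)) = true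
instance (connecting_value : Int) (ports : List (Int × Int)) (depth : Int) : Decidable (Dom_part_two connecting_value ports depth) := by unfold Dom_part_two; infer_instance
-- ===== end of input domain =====

-- B memoizes the depth-independent search on (connecting_value, remaining ports) instead of
-- re-solving each such state once per ordering that reaches it (objective: faster).
-- `ports` is a Python set: the list holds its distinct elements.

-- Python's `max` / `>` on 2-tuples of ints (lexicographic; used by both programs)
def pymax (x y : Int × Int) : Int × Int :=
  if x.1 < y.1 ∨ (x.1 = y.1 ∧ x.2 < y.2) then y else x

-- ===== PORT A =====
def part_two (connecting_value : Int) (ports : List (Int × Int)) (depth : Int) : Int × Int :=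
  -- valid_ports = (port for port in ports if connecting_value in port)
  (ports.filter (fun p => p.1 == connecting_value || p.2 == connecting_value)).attach.foldl
    (fun max_strength pp =>
      let p := pp.1
      let next_value := if p.1 == connecting_value then p.2 else p.1
      let r := part_two next_value (ports.filter (fun q => !(q == p))) (depth + 1)
      pymax max_strength (r.1, r.2 + p.1 + p.2))
    (depth, 0)
termination_by ports.length
decreasing_by
  have h := (List.mem_filter.mp pp.2).1
  have hlt : (List.filter (fun x => !(x.1 == pp.1)) ports.attach).length < ports.attach.length := by
    refine List.length_filter_lt_length_iff_exists.mpr ⟨⟨pp.1, h⟩, List.mem_attach _ _, ?_⟩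
    simp
  simpa using hlt

-- ===== PORT B =====
-- B's memo is keyed by (cv, frozenset remaining); ported as the remaining-ports list, which is
-- canonical here because set difference is ported order-preservingly (filter on the same list).
def bridgeBest (cv : Int) (ports : List (Int × Int))
    (memo : PySem.Dict (Int × List (Int × Int)) (Int × Int)) :
    (Int × Int) × PySem.Dict (Int × List (Int × Int)) (Int × Int) :=
  match memo.get? (cv, ports) with
  | some v => (v, memo)
  | none =>
    let acc :=
      (ports.filter (fun p => p.1 == cv || p.2 == cv)).attach.foldl
        (fun acc pp =>
          let p := pp.1
          let nv := if p.1 == cv then p.2 else p.1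
          let rm := bridgeBest nv (ports.filter (fun q => !(q == p))) acc.2
          (pymax acc.1 (rm.1.1 + 1, rm.1.2 + p.1 + p.2), rm.2))
        (((0 : Int), (0 : Int)), memo)
    (acc.1, acc.2.insert (cv, ports) acc.1)
termination_by ports.length
decreasing_by
  have h := (List.mem_filter.mp pp.2).1
  have hlt : (List.filter (fun x => !(x.1 == pp.1)) ports.attach).length < ports.attach.length := by
    refine List.length_filter_lt_length_iff_exists.mpr ⟨⟨pp.1, h⟩, List.mem_attach _ _, ?_⟩
    simp
  simpa using hlt

def part_two_alt (connecting_value : Int) (ports : List (Int × Int)) (depth : Int) : Int × Int :=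
  let r := (bridgeBest connecting_value ports PySem.Dict.empty).1
  (depth + r.1, r.2)

-- ===== PRECONDITION & SPEC =====
def Spec_part_two (connecting_value : Int) (ports : List (Int × Int)) (depth : Int) (out : Int × Int) : Prop := out = part_two_alt connecting_value ports depth
instance (connecting_value : Int) (ports : List (Int × Int)) (depth : Int) (out : Int × Int) : Decidable (Spec_part_two connecting_value ports depth out) := by unfold Spec_part_two; infer_instance

-- ===== CLAIM (what is proved, stated in full; the proofs are below) =====
def Claim_equal_part_two : Prop := ∀ (connecting_value : Int) (ports : List (Int × Int)) (depth : Int), Dom_part_two connecting_value ports depth → Spec_part_two connecting_value ports depth (part_two connecting_value ports depth)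

-- ===== LEMMAS AND PROOFS =====

-- set difference `s - {p}` (removes the element; cited by the termination proofs)
theorem pv_remove_lt {α : Type} [BEq α] [LawfulBEq α] {p : α} {l : List α} (h : p ∈ l) :
    (l.filter (fun q => !(q == p))).length < l.length := by
  refine List.length_filter_lt_length_iff_exists.mpr ⟨p, h, ?_⟩
  simp

-- the depth-independent value both programs compute: (bridge length, bridge strength)
def gBest (cv : Int) (ports : List (Int × Int)) : Int × Int :=
  (ports.filter (fun p => p.1 == cv || p.2 == cv)).attach.foldl
    (fun b pp =>
      let p := pp.1
      let nv := if p.1 == cv then p.2 else p.1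
      let r := gBest nv (ports.filter (fun q => !(q == p)))
      pymax b (r.1 + 1, r.2 + p.1 + p.2))
    ((0 : Int), (0 : Int))
termination_by ports.length
decreasing_by
  have h := (List.mem_filter.mp pp.2).1
  have hlt : (List.filter (fun x => !(x.1 == pp.1)) ports.attach).length < ports.attach.length := by
    refine List.length_filter_lt_length_iff_exists.mpr ⟨⟨pp.1, h⟩, List.mem_attach _ _, ?_⟩
    simp
  simpa using hlt

def shiftp (d : Int) (s : Int × Int) : Int × Int := (d + s.1, s.2)

theorem pymax_shiftp (d : Int) (x y : Int × Int) :
    pymax (shiftp d x) (shiftp d y) = shiftp d (pymax x y) := by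
  unfold pymax shiftp
  split_ifs <;> first | rfl | (exfalso; omega)

theorem foldl_shiftp {α : Type} (f g : (Int × Int) → α → (Int × Int)) (d : Int)
    (h : ∀ s x, f (shiftp d s) x = shiftp d (g s x)) :
    ∀ (L : List α) (s : Int × Int), L.foldl f (shiftp d s) = shiftp d (L.foldl g s) := by
  intro L
  induction L with
  | nil => intro s; rfl
  | cons x xs ih => intro s; simp only [List.foldl]; rw [h]; exact ih _

theorem shift_cand (d : Int) (r : Int × Int) (a b : Int) :
    ((shiftp (d + 1) r).1, (shiftp (d + 1) r).2 + a + b) = shiftp d (r.1 + 1, r.2 + a + b) := by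
  simp [shiftp]; ring

theorem part_two_eq_gBest :
    ∀ (n : Nat) (cv : Int) (ports : List (Int × Int)) (depth : Int), ports.length ≤ n →
      part_two cv ports depth = shiftp depth (gBest cv ports) := by
  intro n
  induction n with
  | zero =>
    intro cv ports depth hlen
    have : ports = [] := List.eq_nil_of_length_eq_zero (Nat.le_zero.mp hlen)
    subst this
    rw [part_two.eq_def, gBest.eq_def]
    simp [shiftp]
  | succ n ih =>
    intro cv ports depth hlen
    rw [part_two.eq_def, gBest.eq_def]
    have hbase : ((depth, (0 : Int)) : Int × Int) = shiftp depth (0, 0) := by simp [shiftp]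
    rw [hbase]
    apply foldl_shiftp
    intro s pp
    have hmem : pp.1 ∈ ports := (List.mem_filter.mp pp.2).1
    have hlt : (ports.filter (fun q => !(q == pp.1))).length ≤ n := by
      have := pv_remove_lt hmem; omega
    dsimp only
    rw [ih _ _ _ hlt, shift_cand, pymax_shiftp]

def MemoInv (m : PySem.Dict (Int × List (Int × Int)) (Int × Int)) : Prop :=
  ∀ cv ps v, m.get? (cv, ps) = some v → v = gBest cv ps

theorem memoInv_insert {m : PySem.Dict (Int × List (Int × Int)) (Int × Int)} (h : MemoInv m)
    (cv : Int) (ps : List (Int × Int)) :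
    MemoInv (m.insert (cv, ps) (gBest cv ps)) := by
  intro cv' ps' v hv
  rw [PySem.Dict.get?_insert] at hv
  split at hv
  · next heq =>
    obtain ⟨h1, h2⟩ := Prod.mk.injEq .. ▸ heq
    cases hv
    rw [h1, h2]
  · exact h _ _ _ hv

theorem bridgeBest_correct :
    ∀ (n : Nat) (cv : Int) (ports : List (Int × Int)) (m : PySem.Dict (Int × List (Int × Int)) (Int × Int)),
      ports.length ≤ n → MemoInv m →
      (bridgeBest cv ports m).1 = gBest cv ports ∧ MemoInv (bridgeBest cv ports m).2 := by
  intro n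
  induction n using Nat.strong_induction_on with
  | _ n ih =>
    intro cv ports m hlen hinv
    rw [bridgeBest.eq_def]
    cases hget : m.get? (cv, ports) with
    | some v =>
      exact ⟨hinv _ _ _ hget, hinv⟩
    | none =>
      have inner : ∀ (L : List {p // p ∈ ports.filter (fun p => p.1 == cv || p.2 == cv)})
          (b : Int × Int) (mm : PySem.Dict (Int × List (Int × Int)) (Int × Int)), MemoInv mm →
          (L.foldl
            (fun acc pp =>
              let p := pp.1
              let nv := if p.1 == cv then p.2 else p.1
              let rm := bridgeBest nv (ports.filter (fun q => !(q == p))) acc.2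
              (pymax acc.1 (rm.1.1 + 1, rm.1.2 + p.1 + p.2), rm.2))
            (b, mm)).1
            = L.foldl
                (fun b pp =>
                  let p := pp.1
                  let nv := if p.1 == cv then p.2 else p.1
                  let r := gBest nv (ports.filter (fun q => !(q == p)))
                  pymax b (r.1 + 1, r.2 + p.1 + p.2))
                b
          ∧ MemoInv (L.foldl
            (fun acc pp =>
              let p := pp.1
              let nv := if p.1 == cv then p.2 else p.1
              let rm := bridgeBest nv (ports.filter (fun q => !(q == p))) acc.2
              (pymax acc.1 (rm.1.1 + 1, rm.1.2 + p.1 + p.2), rm.2))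
            (b, mm)).2 := by
        intro L
        induction L with
        | nil => intro b mm hmm; exact ⟨rfl, hmm⟩
        | cons pp L ihL =>
          intro b mm hmm
          simp only [List.foldl_cons]
          have hmem : pp.1 ∈ ports := (List.mem_filter.mp pp.2).1
          have hrec := ih (ports.filter (fun q => !(q == pp.1))).length
            (lt_of_lt_of_le (pv_remove_lt hmem) hlen)
            (if pp.1.1 == cv then pp.1.2 else pp.1.1)
            (ports.filter (fun q => !(q == pp.1))) mm (le_refl _) hmm
          rw [hrec.1]
          exact ihL _ _ hrec.2
      have hfold := inner ((ports.filter (fun p => p.1 == cv || p.2 == cv)).attach) (0, 0) m hinv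
      rw [gBest.eq_def]
      refine ⟨hfold.1, ?_⟩
      have hval : (((ports.filter (fun p => p.1 == cv || p.2 == cv)).attach).foldl
            (fun acc pp =>
              let p := pp.1
              let nv := if p.1 == cv then p.2 else p.1
              let rm := bridgeBest nv (ports.filter (fun q => !(q == p))) acc.2
              (pymax acc.1 (rm.1.1 + 1, rm.1.2 + p.1 + p.2), rm.2))
            ((0, 0), m)).1 = gBest cv ports := by
        rw [gBest.eq_def]; exact hfold.1
      have h2 := memoInv_insert hfold.2 cv ports
      rw [← hval] at h2
      exact h2

theorem memoInv_empty : MemoInv PySem.Dict.empty := by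
  intro cv ps v hv
  rw [PySem.Dict.get?_empty] at hv
  cases hv

theorem part_two_alt_eq_gBest (cv : Int) (ports : List (Int × Int)) (depth : Int) :
    part_two_alt cv ports depth = shiftp depth (gBest cv ports) := by
  unfold part_two_alt
  rw [(bridgeBest_correct ports.length cv ports PySem.Dict.empty (le_refl _) memoInv_empty).1]
  rfl

-- ===== VERDICT (by name: the statement is the Claim_ definition above) =====
theorem part_two_spec : Claim_equal_part_two := by
  intro cv ports depth _
  unfold Spec_part_two
  rw [part_two_eq_gBest ports.length cv ports depth (le_refl _), part_two_alt_eq_gBest]
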